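-- pv_equiv track=rewrite | github.com/daniCh8/hand-amodal-segmentation-pytorch | src/utils.py | ld2dl
-- ===== SOURCE A (Python) =====
-- def ld2dl(LD):
--     assert isinstance(LD, list)
--     assert isinstance(LD[0], dict)
--     """
--     A list of dict (same keys) to a dict of lists
--     """
--     dict_list = {k: [dic[k] for dic in LD] for k in LD[0]}
--     return dict_list
-- ===== SOURCE B (Python) =====
-- def ld2dl(LD):
--     assert isinstance(LD, list)
--     assert isinstance(LD[0], dict)
--     """
--     A list of dict (same keys) to a dict of lists
--     """
--     keys = list(LD[0])
--     rows = [list(map(dic.__getitem__, keys)) for dic in LD]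
--     cols = zip(*rows)  # matrix transpose: one column per key
--     return {k: list(c) for k, c in zip(keys, cols)}
-- ===== Notes on version B (the rewrite author's own statement) =====
-- stated objective: alternative
-- what changed: B converts each dict row into a value vector in key order, transposes the resulting matrix with zip(*rows), and zips the columns back with the keys; A instead re-scans the whole list of dicts once per key with a column-wise comprehension.
-- outside the precondition, e.g. on ld2dl([]): A raises IndexError, B raises IndexError
import Mathlib
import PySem

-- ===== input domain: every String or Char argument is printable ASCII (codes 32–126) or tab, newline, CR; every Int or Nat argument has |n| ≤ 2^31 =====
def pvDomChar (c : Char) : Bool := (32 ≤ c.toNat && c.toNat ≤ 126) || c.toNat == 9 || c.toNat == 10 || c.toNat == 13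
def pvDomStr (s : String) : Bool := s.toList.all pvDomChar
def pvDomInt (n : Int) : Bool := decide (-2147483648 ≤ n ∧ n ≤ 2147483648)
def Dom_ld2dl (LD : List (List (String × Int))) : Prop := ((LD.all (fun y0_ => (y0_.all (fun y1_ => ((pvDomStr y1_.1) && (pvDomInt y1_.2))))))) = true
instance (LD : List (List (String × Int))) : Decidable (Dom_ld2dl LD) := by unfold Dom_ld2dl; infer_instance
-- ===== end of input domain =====

-- B builds per-row value vectors and transposes them with zip(*), instead of A's per-key
-- re-scans of LD; return-value equivalence only (objective: alternative).
-- ===== PORT A =====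
-- 'dic[k]' is ported as getD with default 0: Pre_ guarantees the key is present (KeyError excluded).
def ld2dl (LD : List (List (String × Int))) : List (String × List Int) :=
  (LD.headD []).map (fun kv => (kv.1, LD.map (fun dic => (PySem.Dict.mk dic).getD kv.1 0)))

-- ===== PORT B =====
-- Python's zip(*rows): emit one column while every row is nonempty, then recurse on the tails.
def pyZipStar (rows : List (List Int)) : List (List Int) :=
  if h : rows = [] ∨ rows.any List.isEmpty then []
  else (rows.map (fun r => r.headD 0)) :: pyZipStar (rows.map List.tail)
termination_by (rows.headD []).length
decreasing_by
  push Not at h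
  obtain ⟨h1, h2⟩ := h
  cases rows with
  | nil => exact absurd rfl h1
  | cons r rs =>
    simp only [List.any_cons] at h2
    cases r with
    | nil => simp at h2
    | cons a t => simp

-- keys = list(LD[0]); rows = value matrix; cols = zip(*rows); the final dict comprehension
-- over zip(keys, cols) is the zipped association list in order (a dict's keys are distinct).
def ld2dl_alt (LD : List (List (String × Int))) : List (String × List Int) :=
  List.zip ((LD.headD []).map Prod.fst)
    (pyZipStar (LD.map (fun dic =>
      ((LD.headD []).map Prod.fst).map (fun k => (PySem.Dict.mk dic).getD k 0))))

-- ===== PRECONDITION & SPEC =====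
-- Pre_ excludes: LD = [] (A raises IndexError on LD[0]); rows missing a key of LD[0] (KeyError);
-- and duplicate keys in a row — unrepresentable for a Python dict (representation invariant).
def Pre_ld2dl (LD : List (List (String × Int))) : Prop :=
  LD ≠ [] ∧ (∀ dic ∈ LD, (dic.map Prod.fst).Nodup) ∧
    ∀ dic ∈ LD, ∀ p ∈ LD.headD [], (PySem.Dict.mk dic).contains p.1 = true
instance (LD : List (List (String × Int))) : Decidable (Pre_ld2dl LD) := by unfold Pre_ld2dl; infer_instance

def pvWitness_ld2dl : (List (List (String × Int))) := [[("a", 1), ("b", 2)], [("a", 3), ("b", 4)]]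

def Spec_ld2dl (LD : List (List (String × Int))) (out : List (String × List Int)) : Prop := out = ld2dl_alt LD
instance (LD : List (List (String × Int))) (out : List (String × List Int)) : Decidable (Spec_ld2dl LD out) := by unfold Spec_ld2dl; infer_instance

-- ===== CLAIM (what is proved, stated in full; the proofs are below) =====
def Claim_equal_ld2dl : Prop := ∀ (LD : List (List (String × Int))), Dom_ld2dl LD → Pre_ld2dl LD → Spec_ld2dl LD (ld2dl LD)

-- ===== LEMMAS AND PROOFS =====

-- Transposing the matrix whose rows are 'keys.map (f dic)' yields the per-key columns.
theorem pyZipStar_map_map (keys : List String) (LD : List (List (String × Int)))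
    (f : List (String × Int) → String → Int) (hne : LD ≠ []) :
    pyZipStar (LD.map (fun dic => keys.map (f dic)))
      = keys.map (fun k => LD.map (fun dic => f dic k)) := by
  induction keys generalizing LD with
  | nil =>
    rw [pyZipStar]
    cases LD with
    | nil => exact absurd rfl hne
    | cons d ds => simp
  | cons k ks ih =>
    rw [pyZipStar]
    have hcond : ¬(LD.map (fun dic => (k :: ks).map (f dic)) = []
        ∨ (LD.map (fun dic => (k :: ks).map (f dic))).any List.isEmpty) := by
      cases LD with
      | nil => exact absurd rfl hne
      | cons d ds => simp
    rw [dif_neg hcond]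
    simp only [List.map_map, Function.comp_def, List.map_cons, List.headD_cons, List.tail_cons]
    rw [ih LD hne]

theorem ld2dl_eq_alt (LD : List (List (String × Int))) (hne : LD ≠ []) :
    ld2dl LD = ld2dl_alt LD := by
  unfold ld2dl ld2dl_alt
  rw [pyZipStar_map_map _ _ _ hne, List.map_map, List.zip_map']
  rfl

-- ===== VERDICT (by name: the statement is the Claim_ definition above) =====
theorem ld2dl_spec : Claim_equal_ld2dl := by
  intro LD _ hpre
  exact ld2dl_eq_alt LD hpre.1
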